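-- pv_equiv track=rewrite | github.com/yamaceay/dpmlm | core.py | _nth_remove
-- ===== SOURCE A (Python) =====
-- def _nth_remove(text: str, target: str, occurrence: int) -> str:
--     """Remove the nth occurrence of target."""
--     parts = text.split()
--     count = 0
--     for i, part in enumerate(parts):
--         if part == target:
--             count += 1
--             if count == occurrence:
--                 parts.pop(i)
--                 break
--     return " ".join(parts)
-- ===== SOURCE B (Python) =====
-- def _nth_remove(text: str, target: str, occurrence: int) -> str:
--     """Remove the nth occurrence of target.
--
--     Rebuild instead of mutate: one pass that constructs a fresh output list,
--     counting DOWN from `occurrence` on each match and skipping the token when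
--     the countdown reaches 1.  No enumerate, no indices, no pop, no break.
--     """
--     out = []
--     k = occurrence
--     for tok in text.split():
--         if k >= 1 and tok == target:
--             if k == 1:
--                 k = 0
--                 continue
--             k -= 1
--         out.append(tok)
--     return " ".join(out)
-- ===== Notes on version B (the rewrite author's own statement) =====
-- stated objective: simpler
-- what changed: B never touches indices or mutates the token list: instead of A's enumerate + count-up + in-place pop + break, it rebuilds the output list in a single pass with a countdown accumulator, skipping the token when the countdown from `occurrence` hits 1.
import Mathlib
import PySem

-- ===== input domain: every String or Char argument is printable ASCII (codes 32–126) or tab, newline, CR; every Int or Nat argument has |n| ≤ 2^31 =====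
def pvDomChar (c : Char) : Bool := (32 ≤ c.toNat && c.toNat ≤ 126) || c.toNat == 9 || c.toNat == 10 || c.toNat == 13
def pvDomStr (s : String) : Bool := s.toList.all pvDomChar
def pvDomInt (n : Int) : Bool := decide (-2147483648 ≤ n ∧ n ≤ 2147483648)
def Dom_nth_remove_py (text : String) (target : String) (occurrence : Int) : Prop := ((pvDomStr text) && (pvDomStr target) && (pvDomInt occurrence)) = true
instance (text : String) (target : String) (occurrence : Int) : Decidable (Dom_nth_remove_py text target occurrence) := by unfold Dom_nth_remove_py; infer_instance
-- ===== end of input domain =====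

-- B rebuilds the token list in one pass with a countdown accumulator instead of
-- A's enumerate + count-up + in-place pop + break; objective: simpler (no
-- indices, no mutation of the token list).

-- ===== PORT A =====
-- parts.pop(i) used for its list result (i is always a valid index at the call sites)
def pvPop (parts : List String) (i : Int) : List String :=
  ((PySem.List.pop? parts i).map (·.2)).getD parts

-- A's for-loop over enumerate(parts) with the running count; pop-and-break on the nth match
def pvALoop (target : String) (occurrence : Int) (parts : List String)
    (pairs : List (Int × String)) (count : Int) : List String :=
  match pairs with
  | [] => parts
  | (i, part) :: rest =>
    if part = target then
      if count + 1 = occurrence then pvPop parts i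
      else pvALoop target occurrence parts rest (count + 1)
    else pvALoop target occurrence parts rest count

def nth_remove_py (text : String) (target : String) (occurrence : Int) : String :=
  -- parts = text.split(); ' '.join(loop over enumerate(parts) starting with count = 0)
  PySem.Str.join " " (pvALoop target occurrence (PySem.Str.split₀ text)
    (PySem.List.enumerate (PySem.Str.split₀ text) 0) 0)

-- ===== PORT B =====
-- B's loop body: state (out, k); on a match while k ≥ 1, either skip the token
-- (k == 1, Python's `continue`) or append it and count down; otherwise append.
def pvBStep (target : String) (st : List String × Int) (tok : String) : List String × Int :=
  if 1 ≤ st.2 ∧ tok = target then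
    if st.2 = 1 then (st.1, 0)
    else (st.1 ++ [tok], st.2 - 1)
  else (st.1 ++ [tok], st.2)

def nth_remove_py_alt (text : String) (target : String) (occurrence : Int) : String :=
  PySem.Str.join " " (((PySem.Str.split₀ text).foldl (pvBStep target) ([], occurrence)).1)

-- ===== PRECONDITION & SPEC =====
def Spec_nth_remove_py (text : String) (target : String) (occurrence : Int) (out : String) : Prop := out = nth_remove_py_alt text target occurrence
instance (text : String) (target : String) (occurrence : Int) (out : String) : Decidable (Spec_nth_remove_py text target occurrence out) := by unfold Spec_nth_remove_py; infer_instance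

-- ===== CLAIM (what is proved, stated in full; the proofs are below) =====
def Claim_equal_nth_remove_py : Prop := ∀ (text : String) (target : String) (occurrence : Int), Dom_nth_remove_py text target occurrence → Spec_nth_remove_py text target occurrence (nth_remove_py text target occurrence)

-- ===== LEMMAS AND PROOFS =====

-- common reference: the token list with the k-th occurrence of target removed
def pvRem (target : String) : List String → Int → List String
  | [], _ => []
  | h :: t, k =>
    if h = target then (if k = 1 then t else h :: pvRem target t (k - 1))
    else h :: pvRem target t k

theorem pvRem_nonpos (target : String) : ∀ (xs : List String) (k : Int), k ≤ 0 →
    pvRem target xs k = xs := by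
  intro xs
  induction xs with
  | nil => intro k _; rfl
  | cons h t ih =>
    intro k hk
    by_cases hh : h = target
    · simp [pvRem, hh, show ¬ k = 1 by omega, ih (k - 1) (by omega)]
    · simp [pvRem, hh, ih k hk]

theorem pvEraseMid (pre : List String) (h : String) (t : List String) :
    (pre ++ h :: t).eraseIdx pre.length = pre ++ t := by
  induction pre with
  | nil => simp
  | cons p ps ih => simp [ih]

theorem pvPop_middle (pre : List String) (h : String) (t : List String) :
    pvPop (pre ++ h :: t) (pre.length : Int) = pre ++ t := by
  rw [pvPop, PySem.List.pop?_natCast (xs := pre ++ h :: t) (n := pre.length) (by simp)]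
  simp [pvEraseMid]

-- A's loop, run on the enumerated suffix of the decomposition parts = pre ++ suf,
-- equals pre ++ the reference removal on the suffix
theorem pvALoop_eq (target : String) (occurrence : Int) :
    ∀ (suf pre : List String) (c : Int),
      pvALoop target occurrence (pre ++ suf) (PySem.List.enumerate suf (pre.length : Int)) c =
        pre ++ pvRem target suf (occurrence - c) := by
  intro suf
  induction suf with
  | nil => intro pre c; rw [PySem.List.enumerate_nil]; simp [pvALoop, pvRem]
  | cons h t ih =>
    intro pre c
    rw [PySem.List.enumerate_cons]
    by_cases hh : h = target
    · simp only [pvALoop, if_pos hh]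
      by_cases hc : c + 1 = occurrence
      · rw [if_pos hc, pvPop_middle]
        simp [pvRem, hh, show occurrence - c = 1 by omega]
      · rw [if_neg hc]
        have := ih (pre ++ [h]) (c + 1)
        simp only [List.append_assoc, List.singleton_append, List.length_append,
          List.length_singleton] at this
        rw [show ((pre.length : Int) + 1) = ((pre.length + 1 : Nat) : Int) by push_cast; ring,
          this]
        simp [pvRem, hh, show ¬ occurrence - c = 1 by omega,
          show occurrence - (c + 1) = occurrence - c - 1 by ring]
    · simp only [pvALoop, if_neg hh]
      have := ih (pre ++ [h]) c
      simp only [List.append_assoc, List.singleton_append, List.length_append,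
        List.length_singleton] at this
      rw [show ((pre.length : Int) + 1) = ((pre.length + 1 : Nat) : Int) by push_cast; ring,
        this]
      simp [pvRem, hh]

-- B's fold equals the accumulator followed by the reference removal
theorem pvBFold_eq (target : String) :
    ∀ (xs out : List String) (k : Int),
      (xs.foldl (pvBStep target) (out, k)).1 = out ++ pvRem target xs k := by
  intro xs
  induction xs with
  | nil => intro out k; simp [pvRem]
  | cons h t ih =>
    intro out k
    simp only [List.foldl_cons]
    by_cases hh : h = target
    · by_cases h1 : k = 1
      · simp [pvBStep, hh, h1, ih, pvRem, pvRem_nonpos]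
      · by_cases hk : 1 ≤ k
        · simp [pvBStep, hh, h1, hk, ih, pvRem]
        · simp [pvBStep, hh, h1, hk, ih, pvRem,
            pvRem_nonpos target t k (by omega),
            pvRem_nonpos target t (k - 1) (by omega)]
    · simp [pvBStep, hh, ih, pvRem]

-- ===== VERDICT (by name: the statement is the Claim_ definition above) =====
theorem nth_remove_py_spec : Claim_equal_nth_remove_py := by
  intro text target occurrence _
  unfold Spec_nth_remove_py nth_remove_py nth_remove_py_alt
  have hA := pvALoop_eq target occurrence (PySem.Str.split₀ text) [] 0
  simp only [List.nil_append, List.length_nil, Int.natCast_zero, sub_zero] at hA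
  rw [hA, pvBFold_eq]
  simp
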